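-- pv_equiv track=rewrite | github.com/hvijaycse/HackerRank | Edyst/July/AdminBlues.py | possiblities
-- ===== SOURCE A (Python) =====
-- def isConsonant(char):
--     if char not in 'aeiou':
--         return True
--     return False
--
-- def possiblities( curr_string, remaninng_employes, curr_users):
--     ans = 0
--     if remaninng_employes ==0  and len( curr_string) == 0 :
--         return 1
--     if len( curr_string) < 4:
--         return ans
--     start = 0
--     end = start + 3
--     for i in range( end, len( curr_string)):
--         curr_user_id = curr_string[start: i + 1]
--         if  isConsonant( curr_string[start]) and isConsonant( curr_string[i])  and curr_user_id not in curr_users: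
--             curr_users.add( curr_user_id)
--             ans += possiblities( curr_string[i+1: ], remaninng_employes -1, curr_users)
--             curr_users.remove( curr_user_id)
--     return ans
-- ===== SOURCE B (Python) =====
-- def possiblities(curr_string, remaninng_employes, curr_users):
--     # Iterative DFS with an explicit stack of (suffix, remaining, used-ids) frames;
--     # no recursion and no mutation of curr_users (each frame carries its own list
--     # of ids already used on its path).
--     total = 0
--     stack = [(curr_string, remaninng_employes, [])]
--     while stack:
--         s, k, used = stack.pop()
--         if k == 0 and len(s) == 0:
--             total += 1
--             continue
--         if len(s) < 4:
--             continue
--         for i in range(3, len(s)):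
--             seg = s[: i + 1]
--             if (s[0] not in 'aeiou' and s[i] not in 'aeiou'
--                     and seg not in curr_users and seg not in used):
--                 stack.append((s[i + 1:], k - 1, used + [seg]))
--     return total
-- ===== Notes on version B (the rewrite author's own statement) =====
-- stated objective: alternative
-- what changed: Replaces A's recursive backtracking (which temporarily mutates the shared curr_users set and undoes each add) with an iterative explicit-stack DFS whose frames carry their own immutable list of used ids, accumulating the count in a single loop; curr_users is never touched.
import Mathlib
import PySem

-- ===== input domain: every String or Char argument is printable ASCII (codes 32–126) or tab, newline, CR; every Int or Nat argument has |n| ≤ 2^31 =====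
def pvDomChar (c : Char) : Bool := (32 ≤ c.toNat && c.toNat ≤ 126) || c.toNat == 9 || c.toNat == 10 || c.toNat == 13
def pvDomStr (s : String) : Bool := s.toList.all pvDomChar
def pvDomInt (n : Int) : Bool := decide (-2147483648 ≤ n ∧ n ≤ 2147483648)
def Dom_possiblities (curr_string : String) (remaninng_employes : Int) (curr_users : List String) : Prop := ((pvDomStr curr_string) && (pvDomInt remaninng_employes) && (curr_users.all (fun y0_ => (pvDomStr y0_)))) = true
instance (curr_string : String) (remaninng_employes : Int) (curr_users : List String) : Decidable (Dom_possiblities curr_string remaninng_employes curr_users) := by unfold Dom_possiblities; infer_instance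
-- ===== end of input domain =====

-- B replaces A's recursive backtracking (which mutates and restores the shared curr_users
-- set) with an iterative explicit-stack DFS whose frames carry their own used-id lists;
-- same cost.  A temporarily mutates its curr_users argument in place (add then remove,
-- net nil on return) while B never touches it: the equivalence proved here is about the
-- RETURN value only.

-- ===== PORT A =====
-- `char not in 'aeiou'` (membership of a single char in the vowel string)
def pvIsConsonant (c : Char) : Bool := !(['a', 'e', 'i', 'o', 'u'].contains c)

-- A's recursion over the (suffix, remaining, users) state; the Python `curr_users.add`
-- before the recursive call and `.remove` after it are modelled functionally by passing
-- `PySem.Set.add users seg` to the recursive call only (the guard ensures seg is absent,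
-- so add-then-remove restores `users` exactly).  Indexing s[0], s[i] is in range
-- (3 ≤ i < len, len ≥ 4), so `getD` with a dummy default is exact; s[0:i+1]/s[i+1:] are
-- take/drop since the bounds are nonnegative and ≤ len.
def possAux (s : List Char) (k : Int) (users : List String) : Int :=
  if k = 0 ∧ s.length = 0 then 1
  else if s.length < 4 then 0
  else
    (List.range' 3 (s.length - 3)).attach.foldl
      (fun ans x =>
        -- curr_user_id = s[0:i+1]; pure, so inlined at each of its uses
        if pvIsConsonant (s.getD 0 ' ') && pvIsConsonant (s.getD x.1 ' ')
            && !(PySem.Set.contains users (String.ofList (s.take (x.1 + 1))))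
        then ans + possAux (s.drop (x.1 + 1)) (k - 1)
            (PySem.Set.add users (String.ofList (s.take (x.1 + 1))))
        else ans)
      0
termination_by s.length
decreasing_by
  have hx := List.mem_range'_1.mp x.2
  simp only [List.length_drop]
  omega

def possiblities (curr_string : String) (remaninng_employes : Int) (curr_users : List String) : Int :=
  possAux curr_string.toList remaninng_employes curr_users

-- ===== PORT B =====
-- `c not in 'aeiou'` in B's guard
def pvNotVowel (c : Char) : Bool := !(['a', 'e', 'i', 'o', 'u'].contains c)

-- the frames pushed by one iteration of B's while-loop body (the inner for-loop)
def pvPushes (cu : List String) (s : List Char) (k : Int) (used : List String) :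
    List (List Char × Int × List String) :=
  (List.range' 3 (s.length - 3)).filterMap (fun i =>
    if pvNotVowel (s.getD 0 ' ') && pvNotVowel (s.getD i ' ')
        && !(PySem.Set.contains cu (String.ofList (s.take (i + 1))))
        && !(used.contains (String.ofList (s.take (i + 1))))
    then some (s.drop (i + 1), k - 1, used ++ [String.ofList (s.take (i + 1))]) else none)

-- B's while-loop: pop the last frame, handle it, push new frames at the end.
-- The fuel argument only makes the loop total; possiblities_alt supplies enough.
def pvRun (cu : List String) : Nat → List (List Char × Int × List String) → Int → Int
  | 0, _, total => total
  | _ + 1, [], total => total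
  | fuel + 1, f :: rest, total =>
    let fr := (f :: rest).getLast (by simp)
    let stack' := (f :: rest).dropLast
    if fr.2.1 = 0 ∧ fr.1.length = 0 then pvRun cu fuel stack' (total + 1)
    else if fr.1.length < 4 then pvRun cu fuel stack' total
    else pvRun cu fuel (stack' ++ pvPushes cu fr.1 fr.2.1 fr.2.2) total

def possiblities_alt (curr_string : String) (remaninng_employes : Int) (curr_users : List String) : Int :=
  pvRun curr_users (2 ^ curr_string.toList.length)
    [(curr_string.toList, remaninng_employes, [])] 0

-- ===== PRECONDITION & SPEC =====
def Spec_possiblities (curr_string : String) (remaninng_employes : Int) (curr_users : List String) (out : Int) : Prop := out = possiblities_alt curr_string remaninng_employes curr_users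
instance (curr_string : String) (remaninng_employes : Int) (curr_users : List String) (out : Int) : Decidable (Spec_possiblities curr_string remaninng_employes curr_users out) := by unfold Spec_possiblities; infer_instance

-- ===== CLAIM (what is proved, stated in full; the proofs are below) =====
def Claim_equal_possiblities : Prop := ∀ (curr_string : String) (remaninng_employes : Int) (curr_users : List String), Dom_possiblities curr_string remaninng_employes curr_users → Spec_possiblities curr_string remaninng_employes curr_users (possiblities curr_string remaninng_employes curr_users)

-- ===== LEMMAS AND PROOFS =====

-- the A-value of a frame: what A's recursion returns for that (suffix, remaining, used) state
def pvVal (cu : List String) (fr : List Char × Int × List String) : Int :=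
  possAux fr.1 fr.2.1 (cu ++ fr.2.2)

-- termination measure of a stack: Σ 2^(suffix length)
def pvM (stack : List (List Char × Int × List String)) : Nat :=
  (stack.map (fun fr => 2 ^ fr.1.length)).sum

theorem pvM_append (a b : List (List Char × Int × List String)) :
    pvM (a ++ b) = pvM a + pvM b := by
  simp [pvM]

theorem pvVal_base1 (cu : List String) (fr : List Char × Int × List String)
    (h : fr.2.1 = 0 ∧ fr.1.length = 0) : pvVal cu fr = 1 := by
  unfold pvVal; rw [possAux]; simp only [h.1, h.2]; simp

theorem pvVal_base2 (cu : List String) (fr : List Char × Int × List String)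
    (h : ¬(fr.2.1 = 0 ∧ fr.1.length = 0)) (h4 : fr.1.length < 4) : pvVal cu fr = 0 := by
  unfold pvVal; rw [possAux]; rw [if_neg h, if_pos h4]

-- A's loop, written as a sum over the frames B would push from the same state
theorem foldl_guard_sum (cu : List String)
    (g : Nat → Bool) (F : Nat → List Char × Int × List String) :
    ∀ (l : List Nat) (a : Int),
      l.foldl (fun ans i => if g i then ans + pvVal cu (F i) else ans) a
        = a + ((l.filterMap (fun i => if g i then some (F i) else none)).map (pvVal cu)).sum := by
  intro l
  induction l with
  | nil => intro a; simp
  | cons i t ih =>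
    intro a
    by_cases h : g i = true
    · simp only [List.foldl_cons, List.filterMap_cons, h, if_pos]
      rw [ih]
      simp [add_assoc]
    · simp only [List.foldl_cons, List.filterMap_cons, eq_false_of_ne_true h]
      rw [if_neg (by simp [h]), ih]
      simp

theorem possAux_rec (cu used : List String) (s : List Char) (k : Int)
    (h : ¬(k = 0 ∧ s.length = 0)) (h4 : ¬ s.length < 4) :
    possAux s k (cu ++ used) = ((pvPushes cu s k used).map (pvVal cu)).sum := by
  rw [possAux, if_neg h, if_neg h4]
  rw [List.foldl_attach (l := List.range' 3 (s.length - 3)) (b := (0 : Int))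
    (f := fun ans i =>
      if pvIsConsonant (s.getD 0 ' ') && pvIsConsonant (s.getD i ' ')
          && !(PySem.Set.contains (cu ++ used) (String.ofList (s.take (i + 1))))
      then ans + possAux (s.drop (i + 1)) (k - 1)
          (PySem.Set.add (cu ++ used) (String.ofList (s.take (i + 1))))
      else ans)]
  -- rewrite A's step into the guard/frame form of pvPushes
  have hstep :
      (List.range' 3 (s.length - 3)).foldl
        (fun ans i =>
          if pvIsConsonant (s.getD 0 ' ') && pvIsConsonant (s.getD i ' ')
              && !(PySem.Set.contains (cu ++ used) (String.ofList (s.take (i + 1))))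
          then ans + possAux (s.drop (i + 1)) (k - 1)
              (PySem.Set.add (cu ++ used) (String.ofList (s.take (i + 1))))
          else ans) 0
      = (List.range' 3 (s.length - 3)).foldl
        (fun ans i =>
          if pvNotVowel (s.getD 0 ' ') && pvNotVowel (s.getD i ' ')
              && !(PySem.Set.contains cu (String.ofList (s.take (i + 1))))
              && !(used.contains (String.ofList (s.take (i + 1))))
          then ans + pvVal cu (s.drop (i + 1), k - 1, used ++ [String.ofList (s.take (i + 1))])
          else ans) 0 := by
    apply PySem.List.foldl_congr_mem
    intro a i _
    have hguard : (pvIsConsonant (s.getD 0 ' ') && pvIsConsonant (s.getD i ' ')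
        && !(PySem.Set.contains (cu ++ used) (String.ofList (s.take (i + 1)))))
        = (pvNotVowel (s.getD 0 ' ') && pvNotVowel (s.getD i ' ')
        && !(PySem.Set.contains cu (String.ofList (s.take (i + 1))))
        && !(used.contains (String.ofList (s.take (i + 1))))) := by
      simp only [pvIsConsonant, pvNotVowel, PySem.Set.contains]
      cases hc : (cu ++ used).contains (String.ofList (s.take (i + 1))) <;>
        simp_all [PySem.Set.contains, List.contains_append, Bool.or_eq_true, Bool.and_assoc] <;> tauto
    rw [hguard]
    by_cases hg : (pvNotVowel (s.getD 0 ' ') && pvNotVowel (s.getD i ' ')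
        && !(PySem.Set.contains cu (String.ofList (s.take (i + 1))))
        && !(used.contains (String.ofList (s.take (i + 1))))) = true
    · rw [if_pos hg, if_pos hg]
      have hnc : PySem.Set.contains (cu ++ used) (String.ofList (s.take (i + 1))) = false := by
        have := hguard ▸ hg
        simp only [Bool.and_eq_true, Bool.not_eq_true'] at this
        exact this.2
      have hadd : PySem.Set.add (cu ++ used) (String.ofList (s.take (i + 1)))
          = cu ++ (used ++ [String.ofList (s.take (i + 1))]) := by
        unfold PySem.Set.add
        rw [hnc]
        simp
      rw [hadd]
      rfl
    · rw [if_neg hg, if_neg hg]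
  rw [hstep]
  have := foldl_guard_sum cu
    (fun i => pvNotVowel (s.getD 0 ' ') && pvNotVowel (s.getD i ' ')
        && !(PySem.Set.contains cu (String.ofList (s.take (i + 1))))
        && !(used.contains (String.ofList (s.take (i + 1)))))
    (fun i => (s.drop (i + 1), k - 1, used ++ [String.ofList (s.take (i + 1))]))
    (List.range' 3 (s.length - 3)) 0
  rw [this]
  simp [pvPushes]

-- geometric sum: Σ_{i ∈ range' a q} 2^(a+q-1-i) = 2^q - 1
theorem pvGeom : ∀ (q a : Nat),
    ((List.range' a q).map (fun i => 2 ^ (a + q - 1 - i))).sum = 2 ^ q - 1 := by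
  intro q
  induction q with
  | zero => intro a; simp
  | succ q ih =>
    intro a
    rw [List.range'_succ]
    simp only [List.map_cons, List.sum_cons]
    have h1 : a + (q + 1) - 1 - a = q := by omega
    have h2 : ((List.range' (a + 1) q).map (fun i => 2 ^ (a + (q + 1) - 1 - i))).sum
        = ((List.range' (a + 1) q).map (fun i => 2 ^ ((a + 1) + q - 1 - i))).sum := by
      apply congrArg
      apply List.map_congr_left
      intro i _
      congr 1
      omega
    rw [h1, h2, ih (a + 1)]
    have hp : (2 : Nat) ^ (q + 1) = 2 ^ q * 2 := pow_succ 2 q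
    have hq : (1 : Nat) ≤ 2 ^ q := Nat.one_le_two_pow
    omega

theorem pvM_pushes_lt (cu : List String) (s : List Char) (k : Int) (used : List String)
    (h4 : 4 ≤ s.length) : pvM (pvPushes cu s k used) < 2 ^ s.length := by
  have hb : pvM (pvPushes cu s k used)
      ≤ ((List.range' 3 (s.length - 3)).map (fun i => 2 ^ (s.length - 1 - i))).sum := by
    unfold pvPushes pvM
    generalize (List.range' 3 (s.length - 3)) = l
    induction l with
    | nil => simp
    | cons i t ih =>
      simp only [List.filterMap_cons, List.map_cons, List.sum_cons]
      by_cases hg : (pvNotVowel (s.getD 0 ' ') && pvNotVowel (s.getD i ' ')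
          && !(PySem.Set.contains cu (String.ofList (s.take (i + 1))))
          && !(used.contains (String.ofList (s.take (i + 1))))) = true
      · rw [if_pos hg]
        simp only [List.map_cons, List.sum_cons, List.length_drop]
        have : s.length - (i + 1) = s.length - 1 - i := by omega
        rw [this]
        exact Nat.add_le_add_left ih _
      · rw [if_neg hg]
        exact le_trans ih (Nat.le_add_left _ _)
  have hg : ((List.range' 3 (s.length - 3)).map (fun i => 2 ^ (s.length - 1 - i))).sum
      = 2 ^ (s.length - 3) - 1 := by
    have := pvGeom (s.length - 3) 3
    have he : ∀ i, 3 + (s.length - 3) - 1 - i = s.length - 1 - i := by intro i; omega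
    simp only [he] at this
    exact this
  have hle : (2 : Nat) ^ (s.length - 3) ≤ 2 ^ s.length :=
    Nat.pow_le_pow_right (by norm_num) (by omega)
  have h1 : (1 : Nat) ≤ 2 ^ (s.length - 3) := Nat.one_le_two_pow
  omega

theorem pvRun_eq (cu : List String) : ∀ (fuel : Nat)
    (stack : List (List Char × Int × List String)) (total : Int),
    pvM stack ≤ fuel →
    pvRun cu fuel stack total = total + (stack.map (pvVal cu)).sum := by
  intro fuel
  induction fuel with
  | zero =>
    intro stack total hM
    cases stack with
    | nil => simp [pvRun]
    | cons f rest =>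
      exfalso
      have : 1 ≤ pvM (f :: rest) := by
        simp only [pvM, List.map_cons, List.sum_cons]
        have := Nat.one_le_two_pow (n := f.1.length)
        omega
      omega
  | succ fuel ih =>
    intro stack total hM
    cases stack with
    | nil => simp [pvRun]
    | cons f rest =>
      have hne : f :: rest ≠ [] := by simp
      set fr := (f :: rest).getLast hne with hfr
      set stack' := (f :: rest).dropLast with hstack'
      have hsplit : stack' ++ [fr] = f :: rest := List.dropLast_append_getLast hne
      have hMsplit : pvM (f :: rest) = pvM stack' + 2 ^ fr.1.length := by
        rw [← hsplit, pvM_append]; simp [pvM]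
      have hVsplit : ((f :: rest).map (pvVal cu)).sum
          = (stack'.map (pvVal cu)).sum + pvVal cu fr := by
        rw [← hsplit]; simp
      have h1 : (1 : Nat) ≤ 2 ^ fr.1.length := Nat.one_le_two_pow
      rw [pvRun]
      by_cases hb1 : fr.2.1 = 0 ∧ fr.1.length = 0
      · rw [if_pos hb1, ih stack' (total + 1) (by omega)]
        rw [hVsplit, pvVal_base1 cu fr hb1]
        ring
      · rw [if_neg hb1]
        by_cases hb2 : fr.1.length < 4
        · rw [if_pos hb2, ih stack' total (by omega)]
          rw [hVsplit, pvVal_base2 cu fr hb1 hb2]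
          ring
        · rw [if_neg hb2]
          have hpush := pvM_pushes_lt cu fr.1 fr.2.1 fr.2.2 (by omega)
          rw [ih (stack' ++ pvPushes cu fr.1 fr.2.1 fr.2.2) total
            (by rw [pvM_append]; omega)]
          rw [hVsplit]
          have hfrval : pvVal cu fr = ((pvPushes cu fr.1 fr.2.1 fr.2.2).map (pvVal cu)).sum :=
            possAux_rec cu fr.2.2 fr.1 fr.2.1 hb1 hb2
          rw [List.map_append, List.sum_append, hfrval]

-- ===== VERDICT (by name: the statement is the Claim_ definition above) =====
theorem possiblities_spec : Claim_equal_possiblities := by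
  intro curr_string remaninng_employes curr_users _
  unfold Spec_possiblities possiblities possiblities_alt
  have hM : pvM [(curr_string.toList, remaninng_employes, ([] : List String))]
      ≤ 2 ^ curr_string.toList.length := by
    simp [pvM]
  rw [pvRun_eq curr_users _ _ 0 hM]
  simp [pvVal]
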